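-- pv_equiv track=rewrite | github.com/over-core/dominion | mcp/dominion_mcp/core/memory.py | prune_memory
-- ===== SOURCE A (Python) =====
-- MEMORY_CAP = 20
--
-- PRUNE_PRIORITY = ["discovery", "preference", "correction"]  # first pruned -> last pruned
--
-- def prune_memory(entries: list[dict], cap: int = MEMORY_CAP) -> list[dict]:
--     """Prune memory entries to stay within cap.
--
--     Priority order (first to be pruned -> last):
--     1. discoveries (oldest first) -- volatile, may be outdated
--     2. preferences (oldest first) -- user-provided but may reflect past state
--     3. corrections (oldest first) -- most valuable, pruned last
--
--     Returns pruned list.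
--     """
--     if len(entries) <= cap:
--         return entries
--
--     # Group by type
--     by_type: dict[str, list[dict]] = {}
--     for entry in entries:
--         t = entry.get("type", "discovery")
--         by_type.setdefault(t, []).append(entry)
--
--     result = list(entries)  # copy
--
--     for prune_type in PRUNE_PRIORITY:
--         if len(result) <= cap:
--             break
--         # Remove oldest entries of this type
--         type_entries = [e for e in result if e.get("type", "discovery") == prune_type]
--         # Sort by created date (oldest first)
--         type_entries.sort(key=lambda e: e.get("created", ""))
--
--         while len(result) > cap and type_entries:
--             oldest = type_entries.pop(0)
--             result.remove(oldest)
--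
--     return result
-- ===== SOURCE B (Python) =====
-- MEMORY_CAP = 20
--
-- PRUNE_PRIORITY = ["discovery", "preference", "correction"]  # first pruned -> last pruned
--
-- def prune_memory(entries: list[dict], cap: int = MEMORY_CAP) -> list[dict]:
--     """Prune memory entries to stay within cap.
--
--     For each priority type in turn, the excess oldest entries of that type are
--     marked by position and dropped in one pass, keeping the remaining entries
--     in their original order.
--     """
--     if len(entries) <= cap:
--         return entries
--
--     result = list(entries)
--     for prune_type in PRUNE_PRIORITY:
--         excess = len(result) - cap
--         if excess <= 0:
--             break
--         candidates = sorted(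
--             ((i, e) for i, e in enumerate(result)
--              if e.get("type", "discovery") == prune_type),
--             key=lambda p: p[1].get("created", ""))
--         doomed = {i for i, _ in candidates[:excess]}
--         result = [e for i, e in enumerate(result) if i not in doomed]
--     return result
-- ===== Notes on version B (the rewrite author's own statement) =====
-- stated objective: alternative
-- what changed: Per priority type, B stable-sorts the (index, entry) pairs of that type by created once, marks the excess oldest positions in a set and drops them in a single positional filtering pass, replacing A's repeated type_entries.pop(0) + result.remove(oldest) linear scans; Pre_ excludes only association lists with duplicate keys, which do not encode a Python dict.
import Mathlib
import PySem

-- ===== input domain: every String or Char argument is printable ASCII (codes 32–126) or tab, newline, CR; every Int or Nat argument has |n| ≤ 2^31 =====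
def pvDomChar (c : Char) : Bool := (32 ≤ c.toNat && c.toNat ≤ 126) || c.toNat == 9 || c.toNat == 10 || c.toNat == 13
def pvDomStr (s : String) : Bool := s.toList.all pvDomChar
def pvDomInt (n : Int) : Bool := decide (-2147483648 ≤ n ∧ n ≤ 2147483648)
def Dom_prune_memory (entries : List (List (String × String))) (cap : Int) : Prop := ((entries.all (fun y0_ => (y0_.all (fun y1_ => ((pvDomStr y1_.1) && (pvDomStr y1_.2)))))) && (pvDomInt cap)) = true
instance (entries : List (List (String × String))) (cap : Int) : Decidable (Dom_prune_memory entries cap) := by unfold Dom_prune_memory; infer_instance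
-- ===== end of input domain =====

-- B replaces A's repeated pop(0) + list.remove scans by one stable sort of the
-- (index, entry) pairs per priority type and a single positional filtering pass.

-- ===== PORT A =====
-- entry.get(k, dflt) on a dict encoded as an assoc list (first match wins, per the type convention)
def entryGet (e : List (String × String)) (k dflt : String) : String :=
  match e.find? (fun p => p.1 == k) with
  | some p => p.2
  | none => dflt

-- Python's '==' between two entry dicts: equality of sorted item lists
-- (exact for assoc lists with distinct keys, i.e. lists that encode a Python dict)
def entryCanon (e : List (String × String)) : List (String × String) :=
  PySem.List.sorted2 e (fun p => p.1) (fun p => p.2)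

def entryEq (a b : List (String × String)) : Bool := entryCanon a == entryCanon b

-- result.remove(oldest): drop the first element == oldest (absence = ValueError, unreachable in A)
def removeFirst : List (List (String × String)) → List (String × String) → List (List (String × String))
  | [], _ => []
  | x :: xs, v => if entryEq x v then xs else x :: removeFirst xs v

-- A's inner while-loop: pop from the sorted type entries while len(result) > cap
def pruneWhile (result : List (List (String × String))) (tes : List (List (String × String)))
    (cap : Int) : List (List (String × String)) :=
  match tes with
  | [] => result
  | oldest :: rest =>
    if cap < PySem.List.len result then pruneWhile (removeFirst result oldest) rest cap
    else result

-- A's per-type loop body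
def pruneStep (cap : Int) (result : List (List (String × String))) (t : String) :
    List (List (String × String)) :=
  if PySem.List.len result ≤ cap then result  -- the 'break'
  else
    pruneWhile result
      (PySem.List.sorted (result.filter (fun e => entryGet e "type" "discovery" == t))
        (fun e => entryGet e "created" "")) cap

def prune_memory (entries : List (List (String × String))) (cap : Int) :
    List (List (String × String)) :=
  if PySem.List.len entries ≤ cap then entries
  else
    -- by_type is built by A but never read afterwards (dead code); kept for fidelity
    let _by_type : PySem.Dict String (List (List (String × String))) :=
      entries.foldl
        (fun d e => d.modify (entryGet e "type" "discovery") [] (fun l => l ++ [e]))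
        PySem.Dict.empty
    List.foldl (pruneStep cap) entries ["discovery", "preference", "correction"]

-- ===== PORT B =====
-- B's per-type loop body: stable-sort the (index, entry) pairs of this type by
-- created, mark the excess oldest indices, drop them in one filtering pass
def pruneStepAlt (cap : Int) (result : List (List (String × String))) (t : String) :
    List (List (String × String)) :=
  let excess : Int := PySem.List.len result - cap
  if excess ≤ 0 then result  -- the 'break'
  else
    let candidates := PySem.List.sorted
      ((PySem.List.enumerate result).filter (fun p => entryGet p.2 "type" "discovery" == t))
      (fun p => entryGet p.2 "created" "")
    let doomed : PySem.Set Int :=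
      PySem.Set.ofList ((PySem.List.slice candidates none (some excess)).map (fun p => p.1))
    ((PySem.List.enumerate result).filter (fun p => !(PySem.Set.contains doomed p.1))).map
      (fun p => p.2)

def prune_memory_alt (entries : List (List (String × String))) (cap : Int) :
    List (List (String × String)) :=
  if PySem.List.len entries ≤ cap then entries
  else List.foldl (pruneStepAlt cap) entries ["discovery", "preference", "correction"]

-- ===== PRECONDITION & SPEC =====
-- Pre_ excludes only association lists with a duplicated key: those do not encode
-- a Python dict (A's argument is a list of dicts), so no Python input is excluded.
def Pre_prune_memory (entries : List (List (String × String))) (cap : Int) : Prop :=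
  ∀ e ∈ entries, (e.map Prod.fst).Nodup
instance (entries : List (List (String × String))) (cap : Int) : Decidable (Pre_prune_memory entries cap) := by unfold Pre_prune_memory; infer_instance

def pvWitness_prune_memory : (List (List (String × String))) × Int :=
  ([[("type", "discovery"), ("created", "2024")], [("type", "correction")]], 1)

def Spec_prune_memory (entries : List (List (String × String))) (cap : Int) (out : List (List (String × String))) : Prop := out = prune_memory_alt entries cap
instance (entries : List (List (String × String))) (cap : Int) (out : List (List (String × String))) : Decidable (Spec_prune_memory entries cap out) := by unfold Spec_prune_memory; infer_instance

-- ===== CLAIM (what is proved, stated in full; the proofs are below) =====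
def Claim_equal_prune_memory : Prop := ∀ (entries : List (List (String × String))) (cap : Int), Dom_prune_memory entries cap → Pre_prune_memory entries cap → Spec_prune_memory entries cap (prune_memory entries cap)

-- ===== LEMMAS AND PROOFS =====

-- number of entries of l in the canonical class c
def cnt (l : List (List (String × String))) (c : List (String × String)) : Nat :=
  l.countP (fun x => entryCanon x == c)

-- remove the first entry of the budget list equal to v (none if absent)
def removeFirst? : List (List (String × String)) → List (String × String) →
    Option (List (List (String × String)))
  | [], _ => none
  | x :: xs, v => if entryEq x v then some xs else (removeFirst? xs v).map (x :: ·)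

-- walk r, dropping each entry that still matches something in the budget list P
def consume : List (List (String × String)) → List (List (String × String)) →
    List (List (String × String))
  | [], _ => []
  | x :: xs, P =>
    match removeFirst? P x with
    | some P' => consume xs P'
    | none => x :: consume xs P

-- walk r, dropping the first (q c) entries of every canonical class c
def dropQuota : List (List (String × String)) → (List (String × String) → Nat) →
    List (List (String × String))
  | [], _ => []
  | x :: xs, q =>
    if 0 < q (entryCanon x) then
      dropQuota xs (fun c => if c = entryCanon x then q c - 1 else q c)
    else x :: dropQuota xs q

theorem entryEq_iff (a b : List (String × String)) :
    entryEq a b = true ↔ entryCanon a = entryCanon b := by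
  simp [entryEq]

theorem cnt_cons (x : List (String × String)) (l : List (List (String × String)))
    (c : List (String × String)) :
    cnt (x :: l) c = cnt l c + (if entryCanon x = c then 1 else 0) := by
  simp [cnt, List.countP_cons]

theorem removeFirst_of_cnt_pos (r : List (List (String × String))) (v : List (String × String))
    (h : cnt r (entryCanon v) ≠ 0) :
    (removeFirst r v).length + 1 = r.length ∧
      ∀ c, cnt (removeFirst r v) c + (if entryCanon v = c then 1 else 0) = cnt r c := by
  induction r with
  | nil => simp [cnt] at h
  | cons x xs ih =>
    by_cases hx : entryCanon x = entryCanon v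
    · have hxv : entryEq x v = true := (entryEq_iff x v).mpr hx
      constructor
      · simp [removeFirst, hxv]
      · intro c
        rw [cnt_cons]
        simp [removeFirst, hxv, hx]
    · have hxv : ¬ entryEq x v = true := fun hh => hx ((entryEq_iff x v).mp hh)
      have h' : cnt xs (entryCanon v) ≠ 0 := by
        have := cnt_cons x xs (entryCanon v)
        simp [hx] at this
        omega
      obtain ⟨ih1, ih2⟩ := ih h'
      constructor
      · simpa [removeFirst, hxv] using ih1
      · intro c
        have := ih2 c
        have hrw : removeFirst (x :: xs) v = x :: removeFirst xs v := by
          simp [removeFirst, hxv]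
        rw [hrw, cnt_cons, cnt_cons]
        omega

theorem removeFirst?_eq_none_iff (P : List (List (String × String))) (v : List (String × String)) :
    removeFirst? P v = none ↔ cnt P (entryCanon v) = 0 := by
  induction P with
  | nil => simp [removeFirst?, cnt]
  | cons x xs ih =>
    by_cases hx : entryCanon x = entryCanon v
    · have hxv : entryEq x v = true := (entryEq_iff x v).mpr hx
      simp [removeFirst?, hxv, cnt_cons, hx]
    · have hxv : ¬ entryEq x v = true := fun hh => hx ((entryEq_iff x v).mp hh)
      simp [removeFirst?, hxv, cnt_cons, hx, ih, Option.map_eq_none_iff]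

theorem removeFirst?_some (P : List (List (String × String))) (v : List (String × String))
    (P' : List (List (String × String))) (h : removeFirst? P v = some P') :
    ∀ c, cnt P' c + (if entryCanon v = c then 1 else 0) = cnt P c := by
  induction P generalizing P' with
  | nil => simp [removeFirst?] at h
  | cons x xs ih =>
    by_cases hx : entryCanon x = entryCanon v
    · have hxv : entryEq x v = true := (entryEq_iff x v).mpr hx
      simp [removeFirst?, hxv] at h
      subst h
      intro c
      rw [cnt_cons, hx]
    · have hxv : ¬ entryEq x v = true := fun hh => hx ((entryEq_iff x v).mp hh)
      simp [removeFirst?, hxv] at h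
      obtain ⟨P2, hP2, hP'⟩ := h
      subst hP'
      intro c
      have := ih P2 hP2 c
      rw [cnt_cons, cnt_cons]
      omega

theorem consume_nil (r : List (List (String × String))) : consume r [] = r := by
  induction r with
  | nil => simp [consume]
  | cons x xs ih => simp [consume, removeFirst?, ih]

theorem consume_cons_budget (p : List (String × String)) :
    ∀ (r P : List (List (String × String))),
      consume r (p :: P) = consume (removeFirst r p) P := by
  intro r
  induction r with
  | nil => intro P; simp [consume, removeFirst]
  | cons x xs ih =>
    intro P
    by_cases hx : entryCanon x = entryCanon p
    · have h1 : entryEq x p = true := (entryEq_iff x p).mpr hx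
      have h2 : entryEq p x = true := (entryEq_iff p x).mpr hx.symm
      simp [consume, removeFirst, removeFirst?, h1, h2]
    · have h1 : ¬ entryEq x p = true := fun hh => hx ((entryEq_iff x p).mp hh)
      have h2 : ¬ entryEq p x = true := fun hh => hx ((entryEq_iff p x).mp hh).symm
      cases h3 : removeFirst? P x with
      | none =>
        simp [consume, removeFirst, removeFirst?, h1, h2, h3, ih]
      | some P2 =>
        simp [consume, removeFirst, removeFirst?, h1, h2, h3, ih]

theorem foldl_removeFirst_eq_consume :
    ∀ (P r : List (List (String × String))), List.foldl removeFirst r P = consume r P := by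
  intro P
  induction P with
  | nil => intro r; simp [consume_nil]
  | cons p P ih =>
    intro r
    rw [List.foldl_cons, ih, consume_cons_budget]

theorem pruneWhile_eq (cap : Int) :
    ∀ (S r : List (List (String × String))), (∀ c, cnt S c ≤ cnt r c) →
      pruneWhile r S cap = List.foldl removeFirst r (S.take ((r.length : Int) - cap).toNat) := by
  intro S
  induction S with
  | nil => intro r _; simp [pruneWhile]
  | cons o rest ih =>
    intro r h
    by_cases hc : cap < (r.length : Int)
    · have h1 : cnt r (entryCanon o) ≠ 0 := by
        have := h (entryCanon o)
        rw [cnt_cons] at this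
        simp at this
        omega
      obtain ⟨hlen, hcnt⟩ := removeFirst_of_cnt_pos r o h1
      have htake : ((r.length : Int) - cap).toNat
          = (((removeFirst r o).length : Int) - cap).toNat + 1 := by omega
      have hrec : ∀ c, cnt rest c ≤ cnt (removeFirst r o) c := by
        intro c
        have hh := h c
        rw [cnt_cons] at hh
        have := hcnt c
        omega
      rw [htake]
      simp only [pruneWhile, PySem.List.len_eq, hc, List.take_succ_cons,
        List.foldl_cons]
      exact ih (removeFirst r o) hrec
    · have htake : ((r.length : Int) - cap).toNat = 0 := by omega
      simp [pruneWhile, htake, hc]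

-- consume by a budget list = dropQuota by its class counts
theorem consume_eq_dropQuota :
    ∀ (r P : List (List (String × String))) (q : List (String × String) → Nat),
      (∀ c, q c = cnt P c) → consume r P = dropQuota r q := by
  intro r
  induction r with
  | nil => intro P q h; simp [consume, dropQuota]
  | cons x xs ih =>
    intro P q h
    cases h3 : removeFirst? P x with
    | none =>
      have h0 : cnt P (entryCanon x) = 0 := (removeFirst?_eq_none_iff P x).mp h3
      have hq : ¬ 0 < q (entryCanon x) := by rw [h]; omega
      simp only [consume, h3, dropQuota, if_neg hq]
      rw [ih P q h]
    | some P' =>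
      have hc := removeFirst?_some P x P' h3
      have hq : 0 < q (entryCanon x) := by
        have h1 := hc (entryCanon x)
        rw [if_pos rfl] at h1
        have h2 := h (entryCanon x)
        omega
      simp only [consume, h3, dropQuota, if_pos hq]
      apply ih P'
      intro c
      have h1 := hc c
      have h2 := h c
      have h4 := h (entryCanon x)
      by_cases hcc : c = entryCanon x
      · subst hcc
        rw [if_pos rfl] at h1 ⊢
        omega
      · rw [if_neg hcc]
        rw [if_neg (fun hh => hcc hh.symm)] at h1
        omega

-- the budget left after processing a prefix is the saturating difference
theorem dropQuota_append :
    ∀ (a b : List (List (String × String))) (q : List (String × String) → Nat),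
      dropQuota (a ++ b) q = dropQuota a q ++ dropQuota b (fun c => q c - cnt a c) := by
  intro a
  induction a with
  | nil =>
    intro b q
    simp [dropQuota, cnt]
  | cons x a ih =>
    intro b q
    by_cases hq : 0 < q (entryCanon x)
    · have hfq : (fun c => (if c = entryCanon x then q c - 1 else q c) - cnt a c)
          = (fun c => q c - cnt (x :: a) c) := by
        funext c
        rw [cnt_cons]
        by_cases hcc : c = entryCanon x
        · subst hcc; rw [if_pos rfl, if_pos rfl]; omega
        · rw [if_neg hcc, if_neg (fun hh => hcc hh.symm)]; omega
      simp only [List.cons_append, dropQuota, if_pos hq, ih, hfq]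
    · have hfq : (fun c => q c - cnt a c) = (fun c => q c - cnt (x :: a) c) := by
        funext c
        rw [cnt_cons]
        by_cases hcc : c = entryCanon x
        · subst hcc; rw [if_pos rfl]; omega
        · rw [if_neg (fun hh => hcc hh.symm)]; omega
      simp only [List.cons_append, dropQuota, if_neg hq, ih, hfq]

-- dropQuota drops exactly the elements whose class count in the preceding prefix
-- is still below the quota
theorem dropQuota_eq_enumFilter (r : List (List (String × String)))
    (q : List (String × String) → Nat) :
    dropQuota r q = ((PySem.List.enumerate r 0).filter
        (fun p => decide (q (entryCanon p.2) ≤ cnt (r.take p.1.toNat) (entryCanon p.2)))).map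
      (fun p => p.2) := by
  induction r using List.reverseRecOn with
  | nil => simp [dropQuota, PySem.List.enumerate]
  | append_singleton a x ih =>
    rw [dropQuota_append, PySem.List.enumerate_append, List.filter_append, List.map_append]
    congr 1
    · rw [ih]
      apply congrArg
      apply List.filter_congr
      intro p hp
      obtain ⟨k, hk, rfl⟩ := (PySem.List.mem_enumerate_iff a 0 p).mp hp
      simp only [zero_add, Int.toNat_natCast]
      rw [List.take_append_of_le_length (le_of_lt hk)]
    · simp only [PySem.List.enumerate_cons, zero_add, PySem.List.enumerate_nil]
      have htake : (a ++ [x]).take ((a.length : Int)).toNat = a := by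
        simp
      by_cases hq : 0 < q (entryCanon x) - cnt a (entryCanon x)
      · have hcond : (decide (q (entryCanon x) ≤ cnt ((a ++ [x]).take ((a.length : Int)).toNat) (entryCanon x))) = false := by
          rw [htake]; simp; omega
        simp only [List.filter_cons, hcond, Bool.false_eq_true, if_false, List.filter_nil,
          List.map_nil, dropQuota, if_pos hq]
      · have hcond : (decide (q (entryCanon x) ≤ cnt ((a ++ [x]).take ((a.length : Int)).toNat) (entryCanon x))) = true := by
          rw [htake]; simp; omega
        simp only [List.filter_cons, hcond, if_true, List.filter_nil, List.map_cons, List.map_nil,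
          dropQuota, if_neg hq]

-- two entries with the same canonical form and duplicate-free keys look up equal
theorem canon_get_congr (a b : List (String × String)) (ha : (a.map Prod.fst).Nodup)
    (_hb : (b.map Prod.fst).Nodup) (h : entryCanon a = entryCanon b) (k d : String) :
    entryGet a k d = entryGet b k d := by
  have hperm : a.Perm b := by
    have h1 : (entryCanon a).Perm a := PySem.List.sorted2_perm a (fun p => p.1) (fun p => p.2) false
    have h2 : (entryCanon b).Perm b := PySem.List.sorted2_perm b (fun p => p.1) (fun p => p.2) false
    rw [h] at h1
    exact h1.symm.trans h2
  have hpw : a.Pairwise (fun x y => x.1 ≠ y.1) := by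
    have := List.pairwise_map.mp ha
    exact this
  have huniq : ∀ p ∈ a, ∀ q ∈ a, p.1 = q.1 → p = q := by
    intro p hp q hq hpq
    by_contra hne
    exact (List.Pairwise.forall (fun x y hh => fun e => hh e.symm) hpw hp hq hne) hpq
  unfold entryGet
  cases hfa : a.find? (fun p => p.1 == k) with
  | none =>
    have hfb : b.find? (fun p => p.1 == k) = none := by
      rw [List.find?_eq_none] at hfa ⊢
      intro x hx
      exact hfa x (hperm.mem_iff.mpr hx)
    rw [hfb]
  | some p =>
    have hpa : p ∈ a := List.mem_of_find?_eq_some hfa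
    have hpk : p.1 = k := by
      have := List.find?_some (p := fun pr : String × String => pr.1 == k) hfa
      simpa using this
    have hpb : p ∈ b := hperm.mem_iff.mp hpa
    cases hfb : b.find? (fun p => p.1 == k) with
    | none =>
      rw [List.find?_eq_none] at hfb
      exact absurd (by simpa using hpk) (hfb p hpb)
    | some q =>
      have hqa : q ∈ a := hperm.mem_iff.mpr (List.mem_of_find?_eq_some hfb)
      have hqk : q.1 = k := by
        have := List.find?_some (p := fun pr : String × String => pr.1 == k) hfb
        simpa using this
      have hpq : p = q := by
        apply huniq p hpa q hqa
        rw [hpk, hqk]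
      rw [hpq]

-- ===== stable insertion sort: equal-key filter is preserved =====
theorem filter_insertBy_of_ne {α : Type} (before : α → α → Bool) (p : α → Bool) (x : α)
    (ys : List α) (hx : p x = false) :
    (PySem.List.insertBy before x ys).filter p = ys.filter p := by
  induction ys with
  | nil => simp [PySem.List.insertBy, hx]
  | cons y ys ih =>
    by_cases hb : before x y = true
    · simp [PySem.List.insertBy, hb, hx]
    · simp only [PySem.List.insertBy, hb, if_false, Bool.false_eq_true, List.filter_cons]
      rw [ih]

theorem filter_insertBy_of_eq {α : Type} (key : α → String) (k0 : String) (x : α)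
    (ys : List α) (hys : ys.Pairwise (fun a b => key a ≤ key b)) (hx : key x = k0) :
    (PySem.List.insertBy (fun a b => decide (key a < key b)) x ys).filter
        (fun y => key y == k0) =
      ys.filter (fun y => key y == k0) ++ [x] := by
  induction ys with
  | nil => simp [PySem.List.insertBy, hx]
  | cons y ys ih =>
    by_cases hb : decide (key x < key y) = true
    · have hlt : key x < key y := of_decide_eq_true hb
      have hy : ¬ (key y == k0) = true := by
        simp only [beq_iff_eq]
        intro hh
        rw [← hx] at hh
        exact absurd hh (ne_of_gt hlt)
      have hys : ∀ z ∈ ys, ¬ (key z == k0) = true := by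
        intro z hz
        have hyz : key y ≤ key z := (List.pairwise_cons.mp hys).1 z hz
        simp only [beq_iff_eq]
        intro hh
        rw [← hx] at hh
        exact absurd hh (ne_of_gt (lt_of_lt_of_le hlt hyz))
      have h1 : ys.filter (fun y => key y == k0) = [] := by
        rw [List.filter_eq_nil_iff]
        exact hys
      rw [show PySem.List.insertBy (fun a b => decide (key a < key b)) x (y :: ys) = x :: y :: ys
        from by simp only [PySem.List.insertBy]; rw [if_pos hb]]
      simp [hx, hy, h1]
    · simp only [PySem.List.insertBy, hb, if_false, Bool.false_eq_true, List.filter_cons]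
      rw [ih (List.pairwise_cons.mp hys).2]
      by_cases hy : (key y == k0) = true
      · simp [hy]
      · simp [hy]

theorem sorted_filter_key {α : Type} (L : List α) (key : α → String) (k0 : String) :
    (PySem.List.sorted L key).filter (fun y => key y == k0) =
      L.filter (fun y => key y == k0) := by
  induction L using List.reverseRecOn with
  | nil => simp [PySem.List.sorted]
  | append_singleton a x ih =>
    rw [PySem.List.sorted_eq_foldl_insertBy, List.foldl_append, List.foldl_cons, List.foldl_nil,
      ← PySem.List.sorted_eq_foldl_insertBy, List.filter_append]
    by_cases hx : key x = k0
    · rw [filter_insertBy_of_eq key k0 x _ (PySem.List.sorted_pairwise a key) hx, ih]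
      simp [hx]
    · rw [filter_insertBy_of_ne _ _ _ _ (by simp [hx]), ih]
      simp [hx]

-- ===== stable insertion sort commutes with map on the sort key's factor =====
theorem insertBy_map {α β : Type} (f : α → β) (c : β → β → Bool) (x : α) (ys : List α) :
    (PySem.List.insertBy (fun a b => c (f a) (f b)) x ys).map f =
      PySem.List.insertBy c (f x) (ys.map f) := by
  induction ys with
  | nil => simp [PySem.List.insertBy]
  | cons y ys ih =>
    by_cases hb : c (f x) (f y) = true
    · simp [PySem.List.insertBy, hb]
    · simp only [List.map_cons, PySem.List.insertBy, hb, if_false, Bool.false_eq_true,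
        List.map_cons]
      rw [ih]

theorem sorted_map {α β : Type} (f : α → β) (k : β → String) (L : List α) :
    (PySem.List.sorted L (fun p => k (f p))).map f = PySem.List.sorted (L.map f) k := by
  rw [PySem.List.sorted_eq_foldl_insertBy, PySem.List.sorted_eq_foldl_insertBy]
  have hgen : ∀ (M : List α) (acc : List α),
      (M.foldl (fun acc x =>
          PySem.List.insertBy (fun a b => decide (k (f a) < k (f b))) x acc) acc).map f =
        (M.map f).foldl (fun acc x =>
          PySem.List.insertBy (fun a b => decide (k a < k b)) x acc) (acc.map f) := by
    intro M
    induction M with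
    | nil => intro acc; simp
    | cons x M ih =>
      intro acc
      simp only [List.foldl_cons, List.map_cons]
      rw [ih, insertBy_map f (fun a b => decide (k a < k b)) x acc]
  simpa using hgen L []

-- x sits right after A₁ and nowhere else: membership in a prefix is a length bound
theorem mem_take_middle {α : Type} (A B : List α) (x : α) (n : Nat)
    (hA : x ∉ A) : (x ∈ (A ++ x :: B).take n ↔ A.length < n) := by
  constructor
  · intro hmem
    by_contra hle
    rw [List.take_append_of_le_length (Nat.le_of_not_lt hle)] at hmem
    exact hA (List.mem_of_mem_take hmem)
  · intro hlt
    rw [List.take_append, List.take_of_length_le (le_of_lt hlt)]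
    have h1 : n - A.length = (n - A.length - 1) + 1 := by omega
    rw [h1, List.take_succ_cons]
    simp

-- the (index, entry) pairs of type t, and their stable sort by created
def Lof (r : List (List (String × String))) (t : String) : List (Int × List (String × String)) :=
  (PySem.List.enumerate r).filter (fun p => entryGet p.2 "type" "discovery" == t)

def Gof (r : List (List (String × String))) (t : String) : List (Int × List (String × String)) :=
  PySem.List.sorted (Lof r t) (fun p => entryGet p.2 "created" "")

-- stability: the class-c₀ pairs come out of the sort in their original order
theorem G_filter_class (r : List (List (String × String))) (t : String)
    (c0 : List (String × String)) (k0 : String)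
    (hkey : ∀ p ∈ Lof r t, entryCanon p.2 = c0 → entryGet p.2 "created" "" = k0) :
    (Gof r t).filter (fun p => entryCanon p.2 == c0) =
      (Lof r t).filter (fun p => entryCanon p.2 == c0) := by
  have hcong : ∀ (M : List (Int × List (String × String))),
      (∀ p ∈ M, p ∈ Lof r t) →
      M.filter (fun p => entryCanon p.2 == c0) =
        (M.filter (fun p => entryGet p.2 "created" "" == k0)).filter
          (fun p => entryCanon p.2 == c0) := by
    intro M hM
    rw [List.filter_filter]
    apply List.filter_congr
    intro p hp
    by_cases hc : entryCanon p.2 = c0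
    · have := hkey p (hM p hp) hc
      simp [hc, this]
    · simp [hc]
  have h1 := hcong (Gof r t) (fun p hp => (PySem.List.sorted_perm (Lof r t) _ false).mem_iff.mp hp)
  have h2 := hcong (Lof r t) (fun p hp => hp)
  rw [h1, h2]
  rw [show Gof r t = PySem.List.sorted (Lof r t) (fun p => entryGet p.2 "created" "") from rfl,
    sorted_filter_key (Lof r t) (fun p => entryGet p.2 "created" "") k0]

-- membership of index k among the pruned positions = the quota test on the prefix count
theorem mem_V_iff (r : List (List (String × String))) (t : String) (m k : Nat)
    (hk : k < r.length) (hN : ∀ e ∈ r, (e.map Prod.fst).Nodup) :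
    ((k : Int) ∈ (((Gof r t).take m).map (fun p => p.1)) ↔
      cnt (r.take k) (entryCanon r[k]) <
        cnt (((Gof r t).take m).map (fun p => p.2)) (entryCanon r[k])) := by
  have hNe : ((r[k]).map Prod.fst).Nodup := hN _ (List.getElem_mem hk)
  have memL_fact : ∀ p ∈ Lof r t, p.2 ∈ r := by
    intro p hpL
    have hpE : p ∈ PySem.List.enumerate r 0 := List.mem_of_mem_filter hpL
    obtain ⟨k', hk', hpe⟩ := (PySem.List.mem_enumerate_iff r 0 p).mp hpE
    subst hpe
    exact List.getElem_mem hk'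
  have hA : ((k : Int) ∈ ((Gof r t).take m).map (fun p => p.1) ↔
      ((k : Int), r[k]) ∈ (Gof r t).take m) := by
    constructor
    · intro hmem
      obtain ⟨p, hp, hp1⟩ := List.mem_map.mp hmem
      have hpL : p ∈ Lof r t :=
        (PySem.List.sorted_perm (Lof r t) _ false).mem_iff.mp (List.mem_of_mem_take hp)
      have hpE : p ∈ PySem.List.enumerate r 0 := List.mem_of_mem_filter hpL
      obtain ⟨k', hk', hpe⟩ := (PySem.List.mem_enumerate_iff r 0 p).mp hpE
      subst hpe
      simp only [zero_add] at hp1 hp ⊢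
      have hkk : k' = k := by exact_mod_cast hp1
      subst hkk
      exact hp
    · intro hmem
      exact List.mem_map.mpr ⟨_, hmem, rfl⟩
  rw [hA]
  by_cases htok : (entryGet (r[k]) "type" "discovery" == t) = true
  · -- r[k] has the pruned type: stability and counting
    have hkey : ∀ p ∈ Lof r t, entryCanon p.2 = entryCanon r[k] →
        entryGet p.2 "created" "" = entryGet (r[k]) "created" "" := by
      intro p hpL hcan
      exact canon_get_congr p.2 r[k] (hN _ (memL_fact p hpL)) hNe hcan "created" ""
    have hocc := G_filter_class r t (entryCanon r[k]) (entryGet (r[k]) "created" "") hkey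
    -- decomposition of the enumeration around position k
    have hlen : (r.take k).length = k := by
      rw [List.length_take]; omega
    have henum : PySem.List.enumerate r 0 =
        PySem.List.enumerate (r.take k) 0 ++
          ((k : Int), r[k]) :: PySem.List.enumerate (r.drop (k+1)) ((k : Int) + 1) := by
      conv_lhs => rw [show r = r.take k ++ r.drop k from (List.take_append_drop k r).symm,
        List.drop_eq_getElem_cons hk]
      rw [PySem.List.enumerate_append, PySem.List.enumerate_cons, hlen]
      norm_num
    have hLsplit : Lof r t =
        ((PySem.List.enumerate (r.take k) 0).filter
            (fun p => entryGet p.2 "type" "discovery" == t))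
          ++ ((k : Int), r[k]) :: ((PySem.List.enumerate (r.drop (k+1)) ((k : Int) + 1)).filter
            (fun p => entryGet p.2 "type" "discovery" == t)) := by
      rw [show Lof r t = (PySem.List.enumerate r).filter
          (fun p => entryGet p.2 "type" "discovery" == t) from rfl, henum,
        List.filter_append, List.filter_cons]
      simp only [htok, if_true]
    -- occ with its two decompositions
    have hVc : (Gof r t).filter (fun p => entryCanon p.2 == entryCanon r[k]) =
        ((Gof r t).take m).filter (fun p => entryCanon p.2 == entryCanon r[k]) ++
          ((Gof r t).drop m).filter (fun p => entryCanon p.2 == entryCanon r[k]) := by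
      rw [← List.filter_append, List.take_append_drop]
    have hO : (Lof r t).filter (fun p => entryCanon p.2 == entryCanon r[k]) =
        (((PySem.List.enumerate (r.take k) 0).filter
            (fun p => entryGet p.2 "type" "discovery" == t)).filter
              (fun p => entryCanon p.2 == entryCanon r[k]))
          ++ ((k : Int), r[k]) :: (((PySem.List.enumerate (r.drop (k+1)) ((k : Int) + 1)).filter
            (fun p => entryGet p.2 "type" "discovery" == t)).filter
              (fun p => entryCanon p.2 == entryCanon r[k])) := by
      rw [hLsplit, List.filter_append, List.filter_cons]
      simp
    -- the pair sits right after the class elements of the prefix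
    have hnotin : ((k : Int), r[k]) ∉ (((PySem.List.enumerate (r.take k) 0).filter
        (fun p => entryGet p.2 "type" "discovery" == t)).filter
          (fun p => entryCanon p.2 == entryCanon r[k])) := by
      intro hmem
      have hpE : ((k : Int), r[k]) ∈ PySem.List.enumerate (r.take k) 0 :=
        List.mem_of_mem_filter (List.mem_of_mem_filter hmem)
      obtain ⟨k', hk', hpe⟩ := (PySem.List.mem_enumerate_iff (r.take k) 0 _).mp hpE
      rw [hlen] at hk'
      have : (k : Int) = (0 : Int) + (k' : Int) := congrArg Prod.fst hpe
      omega
    -- membership in the victims of the class, as a length bound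
    have hmid := mem_take_middle
      (((PySem.List.enumerate (r.take k) 0).filter
          (fun p => entryGet p.2 "type" "discovery" == t)).filter
            (fun p => entryCanon p.2 == entryCanon r[k]))
      (((PySem.List.enumerate (r.drop (k+1)) ((k : Int) + 1)).filter
          (fun p => entryGet p.2 "type" "discovery" == t)).filter
            (fun p => entryCanon p.2 == entryCanon r[k]))
      ((k : Int), r[k])
      ((((Gof r t).take m).filter (fun p => entryCanon p.2 == entryCanon r[k])).length) hnotin
    -- victims-of-class is the prefix of occ of that length
    have htakeVc : ((Gof r t).filter (fun p => entryCanon p.2 == entryCanon r[k])).take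
        ((((Gof r t).take m).filter (fun p => entryCanon p.2 == entryCanon r[k])).length) =
        ((Gof r t).take m).filter (fun p => entryCanon p.2 == entryCanon r[k]) := by
      rw [hVc, List.take_left]
    have hmemVc : (((k : Int), r[k]) ∈ (Gof r t).take m ↔
        ((k : Int), r[k]) ∈ ((Gof r t).take m).filter
          (fun p => entryCanon p.2 == entryCanon r[k])) := by
      rw [List.mem_filter]
      simp
    -- length of the class prefix = class count of r.take k
    have hO1len : ((((PySem.List.enumerate (r.take k) 0).filter
        (fun p => entryGet p.2 "type" "discovery" == t)).filter
          (fun p => entryCanon p.2 == entryCanon r[k])).length) =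
        cnt (r.take k) (entryCanon r[k]) := by
      rw [List.filter_filter, ← List.countP_eq_length_filter]
      have h1 : List.countP
          (fun p : Int × List (String × String) =>
            (entryCanon p.2 == entryCanon r[k]) && (entryGet p.2 "type" "discovery" == t))
          (PySem.List.enumerate (r.take k) 0) =
          List.countP (fun x => (entryCanon x == entryCanon r[k]) && (entryGet x "type" "discovery" == t))
            ((PySem.List.enumerate (r.take k) 0).map (fun p => p.2)) := by
        rw [List.countP_map]
        rfl
      rw [h1, PySem.List.map_snd_enumerate]
      unfold cnt
      apply List.countP_congr
      intro x hx
      constructor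
      · intro hh
        exact (Bool.and_elim_left hh)
      · intro hh
        have hcan : entryCanon x = entryCanon r[k] := by simpa using hh
        have hx2 : x ∈ r := List.mem_of_mem_take hx
        have := canon_get_congr x r[k] (hN _ hx2) hNe hcan "type" "discovery"
        rw [hh]
        simp only [Bool.true_and]
        rw [this]
        exact htok
    -- class count of the victims list
    have hqlen : cnt (((Gof r t).take m).map (fun p => p.2)) (entryCanon r[k]) =
        ((((Gof r t).take m).filter (fun p => entryCanon p.2 == entryCanon r[k])).length) := by
      unfold cnt
      rw [List.countP_map, ← List.countP_eq_length_filter]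
      rfl
    rw [hmemVc, ← htakeVc, hocc, hO, hmid, hO1len, hqlen]
  · -- r[k] is not of the pruned type: no victim in its class, and k is unmarked
    constructor
    · intro hmem
      have hpL : ((k : Int), r[k]) ∈ Lof r t :=
        (PySem.List.sorted_perm (Lof r t) _ false).mem_iff.mp (List.mem_of_mem_take hmem)
      exact absurd (List.of_mem_filter hpL) htok
    · intro hlt
      exfalso
      have hzero : cnt (((Gof r t).take m).map (fun p => p.2)) (entryCanon r[k]) = 0 := by
        unfold cnt
        rw [List.countP_eq_zero]
        intro x hx
        obtain ⟨p, hp, rfl⟩ := List.mem_map.mp hx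
        have hpL : p ∈ Lof r t :=
          (PySem.List.sorted_perm (Lof r t) _ false).mem_iff.mp (List.mem_of_mem_take hp)
        have htokp := List.of_mem_filter hpL
        intro hcan
        have hcan2 : entryCanon p.2 = entryCanon r[k] := by simpa using hcan
        have := canon_get_congr p.2 r[k] (hN _ (memL_fact p hpL)) hNe hcan2 "type" "discovery"
        rw [this] at htokp
        exact absurd htokp htok
      omega

-- per-type step equality (the heart of the proof)
theorem pruneStep_eq (cap : Int) (r : List (List (String × String))) (t : String)
    (hN : ∀ e ∈ r, (e.map Prod.fst).Nodup) :
    pruneStep cap r t = pruneStepAlt cap r t := by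
  by_cases hc : (r.length : Int) ≤ cap
  · unfold pruneStep pruneStepAlt
    simp only [PySem.List.len_eq]
    rw [if_pos hc, if_pos (by omega : (r.length : Int) - cap ≤ 0)]
  · unfold pruneStep pruneStepAlt
    simp only [PySem.List.len_eq]
    rw [if_neg hc, if_neg (by omega : ¬ ((r.length : Int) - cap ≤ 0))]
    set S := PySem.List.sorted (r.filter (fun e => entryGet e "type" "discovery" == t))
      (fun e => entryGet e "created" "") with hS
    have hInv : ∀ c, cnt S c ≤ cnt r c := by
      intro c
      have hperm : cnt S c = cnt (r.filter (fun e => entryGet e "type" "discovery" == t)) c :=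
        List.Perm.countP_eq _ (PySem.List.sorted_perm _ _ _)
      rw [hperm]
      unfold cnt
      rw [List.countP_filter]
      exact List.countP_mono_left (by intro a _ hh; simp at hh; simp [hh.1])
    rw [pruneWhile_eq cap S r hInv, foldl_removeFirst_eq_consume]
    set m := ((r.length : Int) - cap).toNat with hm
    have hGmap : (Gof r t).map (fun p => p.2) = S := by
      rw [hS]
      have h := sorted_map (f := fun p : Int × List (String × String) => p.2)
        (k := fun e => entryGet e "created" "") (L := Lof r t)
      have h2 : (Lof r t).map (fun p : Int × List (String × String) => p.2) =
          r.filter (fun e => entryGet e "type" "discovery" == t) := by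
        rw [show Lof r t = (PySem.List.enumerate r).filter
            (fun p => entryGet p.2 "type" "discovery" == t) from rfl]
        conv_rhs => rw [← PySem.List.map_snd_enumerate r 0]
        rw [List.filter_map]
        rfl
      rw [← h2]
      exact h
    have hSV : S.take m = ((Gof r t).take m).map (fun p => p.2) := by
      rw [← hGmap, List.map_take]
    rw [hSV, consume_eq_dropQuota r _
      (fun c => cnt (((Gof r t).take m).map (fun p => p.2)) c) (fun c => rfl),
      dropQuota_eq_enumFilter]
    rw [PySem.List.slice_to _ (by omega : (0 : Int) ≤ (r.length : Int) - cap), ← hm]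
    rw [show PySem.List.sorted
        ((PySem.List.enumerate r).filter (fun p => entryGet p.2 "type" "discovery" == t))
        (fun p => entryGet p.2 "created" "") = Gof r t from rfl]
    apply congrArg
    apply List.filter_congr
    intro p hp
    obtain ⟨k, hk, rfl⟩ := (PySem.List.mem_enumerate_iff r 0 p).mp hp
    simp only [zero_add, Int.toNat_natCast]
    simp only [List.map_take]
    have hmv := mem_V_iff r t m k hk hN
    simp only [List.map_take] at hmv
    by_cases hlt : cnt (r.take k) (entryCanon r[k]) <
        cnt (List.take m ((Gof r t).map (fun p => p.2))) (entryCanon r[k])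
    · have hmem : (k : Int) ∈ List.take m ((Gof r t).map (fun p => p.1)) := hmv.mpr hlt
      have hcont : PySem.Set.contains
          (PySem.Set.ofList (List.take m ((Gof r t).map (fun p => p.1)))) (k : Int) = true := by
        simp only [PySem.Set.contains, List.contains_eq_mem, decide_eq_true_eq]
        exact (PySem.Set.mem_ofList _ _).mpr hmem
      rw [hcont]
      have hnle : ¬ (cnt (List.take m ((Gof r t).map (fun p => p.2))) (entryCanon r[k]) ≤
          cnt (r.take k) (entryCanon r[k])) := by omega
      simp [hnle]
    · have hmem : ¬ (k : Int) ∈ List.take m ((Gof r t).map (fun p => p.1)) :=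
        fun hh => hlt (hmv.mp hh)
      have hcont : PySem.Set.contains
          (PySem.Set.ofList (List.take m ((Gof r t).map (fun p => p.1)))) (k : Int) = false := by
        simp only [PySem.Set.contains, List.contains_eq_mem, decide_eq_false_iff_not]
        exact fun hh => hmem ((PySem.Set.mem_ofList _ _).mp hh)
      rw [hcont]
      have hle : cnt (List.take m ((Gof r t).map (fun p => p.2))) (entryCanon r[k]) ≤
          cnt (r.take k) (entryCanon r[k]) := Nat.not_lt.mp hlt
      simp [hle]

theorem pruneStepAlt_subset (cap : Int) (r : List (List (String × String))) (t : String) :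
    ∀ e ∈ pruneStepAlt cap r t, e ∈ r := by
  intro e he
  simp only [pruneStepAlt] at he
  split at he
  · exact he
  · obtain ⟨p, hp, rfl⟩ := List.mem_map.mp he
    have hp2 : p ∈ PySem.List.enumerate r 0 := List.mem_of_mem_filter hp
    obtain ⟨k, hk, rfl⟩ := (PySem.List.mem_enumerate_iff r 0 p).mp hp2
    exact List.getElem_mem hk

-- ===== VERDICT (by name: the statement is the Claim_ definition above) =====
theorem prune_memory_spec : Claim_equal_prune_memory := by
  intro entries cap _ hPre
  unfold Spec_prune_memory prune_memory prune_memory_alt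
  split_ifs with h
  · rfl
  · simp only [List.foldl_cons, List.foldl_nil]
    have h1 : ∀ e ∈ entries, (e.map Prod.fst).Nodup := hPre
    rw [pruneStep_eq _ _ _ h1]
    have h2 : ∀ e ∈ pruneStepAlt cap entries "discovery", (e.map Prod.fst).Nodup :=
      fun e he => h1 e (pruneStepAlt_subset _ _ _ e he)
    rw [pruneStep_eq _ _ _ h2]
    have h3 : ∀ e ∈ pruneStepAlt cap (pruneStepAlt cap entries "discovery") "preference",
        (e.map Prod.fst).Nodup :=
      fun e he => h2 e (pruneStepAlt_subset _ _ _ e he)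
    rw [pruneStep_eq _ _ _ h3]
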